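-- pv_equiv track=rewrite | github.com/dat821168/translators | preprocess.py | string_detokenize
-- ===== SOURCE A (Python) =====
-- def string_detokenize(text, feat):
--     text = text.strip()
--     detok = ''
--     index = -1
--     is_subword = False
--     for token in text.split():
--         if "@@" in token:
--             if is_subword:
--                 detok += f"{token}|{feat[index]} "
--             else:
--                 index += 1
--                 detok += f"{token}|{feat[index]} "
--                 is_subword = True
--         else:
--             if is_subword:
--                 detok += f"{token}|{feat[index]} "
--                 is_subword = False
--             else:
--                 index += 1
--                 detok += f"{token}|{feat[index]} "
--     return detok
-- ===== SOURCE B (Python) =====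
-- def string_detokenize(text, feat):
--     # Stage 1: group tokens into words: each maximal run of '@@'-subword tokens
--     # together with the following plain token forms one word (a trailing run
--     # with no closing plain token is also a word).
--     words = []
--     cur = []
--     for token in text.strip().split():
--         cur.append(token)
--         if "@@" not in token:
--             words.append(cur)
--             cur = []
--     if cur:
--         words.append(cur)
--     # Stage 2: every token of word i carries feature feat[i].
--     out = []
--     for i, word in enumerate(words):
--         for token in word:
--             out.append(f"{token}|{feat[i]} ")
--     return ''.join(out)
-- ===== Notes on version B (the rewrite author's own statement) =====
-- stated objective: simpler
-- what changed: Replaced A's single-pass four-branch is_subword state machine by two staged passes over a different intermediate structure: first split the tokens into subword groups (a list of 'words'), then label every token of group i with feat[i] via enumerate, joining once at the end.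
import Mathlib
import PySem

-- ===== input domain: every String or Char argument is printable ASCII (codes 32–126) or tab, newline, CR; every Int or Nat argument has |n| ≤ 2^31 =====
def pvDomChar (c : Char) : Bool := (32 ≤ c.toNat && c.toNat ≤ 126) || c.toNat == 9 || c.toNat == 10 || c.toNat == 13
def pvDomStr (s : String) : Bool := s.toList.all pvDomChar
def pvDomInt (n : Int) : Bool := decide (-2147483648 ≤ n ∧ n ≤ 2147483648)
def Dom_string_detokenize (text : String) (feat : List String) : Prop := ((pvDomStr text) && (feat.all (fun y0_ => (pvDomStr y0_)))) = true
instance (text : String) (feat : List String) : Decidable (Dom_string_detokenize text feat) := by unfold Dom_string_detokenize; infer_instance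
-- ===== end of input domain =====

-- B replaces A's single-pass four-branch `is_subword` state machine by two staged
-- passes: first group the tokens into subword groups ("words"), then label every
-- token of group i with feat[i] (objective: simpler); return values agree on Pre_.

-- ===== PORT A =====
-- loop body of A; state = (detok, index, is_subword); feat[index] is
-- PySem.List.pyGet? (none exactly where Python raises IndexError; those inputs
-- are excluded by Pre_, the .getD "" default is never reached inside Pre_)
def pvStepA (feat : List String) (st : String × Int × Bool) (token : String) : String × Int × Bool :=
  let detok := st.1
  let index := st.2.1
  let is_subword := st.2.2
  if PySem.Str.isIn "@@" token then
    if is_subword then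
      (detok ++ (token ++ "|" ++ (PySem.List.pyGet? feat index).getD "" ++ " "), index, is_subword)
    else
      let index := index + 1
      (detok ++ (token ++ "|" ++ (PySem.List.pyGet? feat index).getD "" ++ " "), index, true)
  else
    if is_subword then
      (detok ++ (token ++ "|" ++ (PySem.List.pyGet? feat index).getD "" ++ " "), index, false)
    else
      let index := index + 1
      (detok ++ (token ++ "|" ++ (PySem.List.pyGet? feat index).getD "" ++ " "), index, is_subword)

def string_detokenize (text : String) (feat : List String) : String :=
  let text := PySem.Str.strip text
  ((PySem.Str.split₀ text).foldl (pvStepA feat) ("", -1, false)).1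

-- ===== PORT B =====
-- stage 1 loop body: state = (words, cur); cur collects the pending group
def pvStepW (st : List (List String) × List String) (token : String) : List (List String) × List String :=
  let cur := st.2 ++ [token]
  if PySem.Str.isIn "@@" token then (st.1, cur) else (st.1 ++ [cur], [])

def pvWords (tokens : List String) : List (List String) :=
  let st := tokens.foldl pvStepW ([], [])
  if st.2 = [] then st.1 else st.1 ++ [st.2]

-- stage 2: nested for-loops over enumerate(words); same pyGet?/.getD "" convention
def string_detokenize_alt (text : String) (feat : List String) : String :=
  let words := pvWords (PySem.Str.split₀ (PySem.Str.strip text))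
  PySem.Str.join ""
    ((PySem.List.enumerate words).foldl
      (fun out iw =>
        iw.2.foldl (fun out token =>
          out ++ [token ++ "|" ++ (PySem.List.pyGet? feat iw.1).getD "" ++ " "]) out)
      [])

-- ===== PRECONDITION & SPEC =====
-- Python A raises IndexError iff the index reached at the last token (= number of
-- tokens without "@@" before it) is ≥ len(feat); B raises at the same accesses.
def Pre_string_detokenize (text : String) (feat : List String) : Prop :=
  let ts := PySem.Str.split₀ (PySem.Str.strip text)
  ts = [] ∨ (ts.dropLast.countP (fun t => !(PySem.Str.isIn "@@" t))) < feat.length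
instance (text : String) (feat : List String) : Decidable (Pre_string_detokenize text feat) := by unfold Pre_string_detokenize; infer_instance

def pvWitness_string_detokenize : String × List String := ("he@@ llo world", ["A", "B"])

def Spec_string_detokenize (text : String) (feat : List String) (out : String) : Prop := out = string_detokenize_alt text feat
instance (text : String) (feat : List String) (out : String) : Decidable (Spec_string_detokenize text feat out) := by unfold Spec_string_detokenize; infer_instance

-- ===== CLAIM (what is proved, stated in full; the proofs are below) =====
def Claim_equal_string_detokenize : Prop := ∀ (text : String) (feat : List String), Dom_string_detokenize text feat → Pre_string_detokenize text feat → Spec_string_detokenize text feat (string_detokenize text feat)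

-- ===== LEMMAS AND PROOFS =====

-- the labelled piece for a token under feature index c
def pvLab (feat : List String) (c : Int) (t : String) : String :=
  t ++ "|" ++ (PySem.List.pyGet? feat c).getD "" ++ " "

-- counter characterisation of the labelled pieces, in token order
def pvCOut (feat : List String) (c : Int) : List String → List String
  | [] => []
  | t :: ts => pvLab feat c t :: pvCOut feat (if PySem.Str.isIn "@@" t then c else c + 1) ts

-- recursive characterisation of B's grouping
def pvG : List String → List String → List (List String)
  | [], cur => if cur = [] then [] else [cur]
  | t :: ts, cur => if PySem.Str.isIn "@@" t then pvG ts (cur ++ [t]) else (cur ++ [t]) :: pvG ts []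

-- recursive characterisation of B's labelling pass
def pvLabelFrom (feat : List String) (c : Int) : List (List String) → List String
  | [] => []
  | w :: ws => w.map (pvLab feat c) ++ pvLabelFrom feat (c + 1) ws

theorem pv_intersperse_nil_flatten {α : Type} (l : List (List α)) :
    (List.intersperse [] l).flatten = l.flatten := by
  induction l with
  | nil => rfl
  | cons a t ih =>
    cases t with
    | nil => simp
    | cons b t2 => simp_all [List.intersperse]

theorem pv_join_cons (a : String) (l : List String) :
    PySem.Str.join "" (a :: l) = a ++ PySem.Str.join "" l := by
  apply String.toList_inj.mp
  simp [PySem.Str.toList_join, PySem.Chars.join, List.intercalate, pv_intersperse_nil_flatten]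

-- stage 1 fold computes pvG (state generalised)
theorem pv_words_eq (ts : List String) :
    ∀ (ws : List (List String)) (cur : List String),
      (let st := ts.foldl pvStepW (ws, cur);
       if st.2 = [] then st.1 else st.1 ++ [st.2]) = ws ++ pvG ts cur := by
  induction ts with
  | nil =>
    intro ws cur
    by_cases h : cur = [] <;> simp [pvG, h]
  | cons t ts ih =>
    intro ws cur
    cases h : PySem.Str.isIn "@@" t
    · simpa only [List.foldl_cons, pvStepW, pvG, h, if_false, Bool.false_eq_true,
          List.append_assoc, List.singleton_append] using ih (ws ++ [cur ++ [t]]) []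
    · simpa only [List.foldl_cons, pvStepW, pvG, h, if_true]
        using ih ws (cur ++ [t])

-- stage 2 fold computes pvLabelFrom (offset and accumulator generalised)
theorem pv_label_eq (feat : List String) (ws : List (List String)) :
    ∀ (s : Int) (out : List String),
      (PySem.List.enumerate ws s).foldl
        (fun out iw =>
          iw.2.foldl (fun out token =>
            out ++ [token ++ "|" ++ (PySem.List.pyGet? feat iw.1).getD "" ++ " "]) out)
        out
      = out ++ pvLabelFrom feat s ws := by
  induction ws with
  | nil => intro s out; simp [PySem.List.enumerate_nil, pvLabelFrom]
  | cons w ws ih =>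
    intro s out
    rw [PySem.List.enumerate_cons, List.foldl_cons]
    rw [show (w.foldl (fun out token =>
          out ++ [token ++ "|" ++ (PySem.List.pyGet? feat s).getD "" ++ " "]) out)
        = out ++ w.map (pvLab feat s)
      from PySem.List.foldl_append_singleton_eq_map
        (fun token => token ++ "|" ++ (PySem.List.pyGet? feat s).getD "" ++ " ") w out, ih]
    simp [pvLabelFrom]

-- grouping then labelling equals the counter characterisation
theorem pv_group_label (feat : List String) (ts : List String) :
    ∀ (c : Int) (cur : List String),
      pvLabelFrom feat c (pvG ts cur) = cur.map (pvLab feat c) ++ pvCOut feat c ts := by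
  induction ts with
  | nil =>
    intro c cur
    by_cases h : cur = [] <;> simp [pvG, pvCOut, pvLabelFrom, h]
  | cons t ts ih =>
    intro c cur
    cases h : PySem.Str.isIn "@@" t
    · rw [show pvG (t :: ts) cur = (cur ++ [t]) :: pvG ts []
          from by simp only [pvG, h, Bool.false_eq_true, if_false]]
      simp only [pvLabelFrom, ih (c + 1) []]
      simp only [pvCOut, h, Bool.false_eq_true, if_false]
      simp [pvLab]
    · rw [show pvG (t :: ts) cur = pvG ts (cur ++ [t])
          from by simp only [pvG, h, if_true], ih]
      simp only [pvCOut, h, if_true]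
      simp [pvLab]

-- A's fold computes the join of the counter pieces:
-- invariant index = c - (1 - [is_subword])
theorem pv_main (feat : List String) (ts : List String) :
    ∀ (acc : String) (c : Int) (sw : Bool),
      (ts.foldl (pvStepA feat) (acc, (if sw then c else c - 1), sw)).1
        = acc ++ PySem.Str.join "" (pvCOut feat c ts) := by
  induction ts with
  | nil =>
    intro acc c sw
    apply String.toList_inj.mp
    simp [pvCOut, PySem.Str.toList_join, PySem.Chars.join, List.intercalate]
  | cons t ts ih =>
    intro acc c sw
    simp only [List.foldl_cons]
    have hA : pvStepA feat (acc, (if sw then c else c - 1), sw) t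
        = (acc ++ (t ++ "|" ++ (PySem.List.pyGet? feat c).getD "" ++ " "),
           (if PySem.Str.isIn "@@" t
              then (if PySem.Str.isIn "@@" t then c else c + 1)
              else (if PySem.Str.isIn "@@" t then c else c + 1) - 1),
           PySem.Str.isIn "@@" t) := by
      cases h : PySem.Str.isIn "@@" t <;> cases sw <;> simp [pvStepA] <;> simp_all
    rw [hA, ih]
    simp only [pvCOut, pv_join_cons]
    simp [pvLab, String.append_assoc]

-- ===== VERDICT (by name: the statement is the Claim_ definition above) =====
theorem string_detokenize_spec : Claim_equal_string_detokenize := by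
  intro text feat _ _
  unfold Spec_string_detokenize string_detokenize string_detokenize_alt pvWords
  have hA := pv_main feat (PySem.Str.split₀ (PySem.Str.strip text)) "" 0 false
  have hW := pv_words_eq (PySem.Str.split₀ (PySem.Str.strip text)) [] []
  have hL := pv_label_eq feat (pvG (PySem.Str.split₀ (PySem.Str.strip text)) []) 0 []
  have hG := pv_group_label feat (PySem.Str.split₀ (PySem.Str.strip text)) 0 []
  simp only [List.nil_append] at hW hL hG
  simp only [hW, hL, hG]
  simpa using hA
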